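-- pv_equiv track=rewrite | github.com/KWChen1997/network_attacker | ip2mac.py | nm2num
-- ===== SOURCE A (Python) =====
-- def nm2num(nm):
--     tmp = nm.split('.')
--     mask = 0
--     for m in tmp:
--         mask = mask << 8
--         mask += int(m)
--
--     mask = 0xffffffff - mask
--     count = 0
--     while mask != 0:
--         count += 1
--         mask = mask >> 1
--
--     return 32 - count
-- ===== SOURCE B (Python) =====
-- def nm2num(nm):
--     fields = nm.split('.')
--     mask = 0
--     shift = 0
--     for f in reversed(fields):
--         mask += int(f) << shift
--         shift += 8
--     count = 0
--     for bit in range(31, -1, -1):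
--         if (mask >> bit) & 1 == 0:
--             break
--         count += 1
--     return count
-- ===== Notes on version B (the rewrite author's own statement) =====
-- stated objective: alternative
-- what changed: B accumulates the fields LSB-first with a running shift and then counts the mask's leading 1-bits directly, scanning bit 31 downward and stopping at the first 0, instead of A's Horner accumulation followed by complementing against 0xffffffff and shifting the wildcard to zero to measure its width; Pre_ additionally excludes strings whose fields make the mask value negative, a meaningless netmask on which A returns a negative count.
-- outside the precondition, e.g. on nm2num('-1'): A returns -1, B returns 32; on nm2num('-1.0.0.0'): A returns -1, B returns 8
import Mathlib
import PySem

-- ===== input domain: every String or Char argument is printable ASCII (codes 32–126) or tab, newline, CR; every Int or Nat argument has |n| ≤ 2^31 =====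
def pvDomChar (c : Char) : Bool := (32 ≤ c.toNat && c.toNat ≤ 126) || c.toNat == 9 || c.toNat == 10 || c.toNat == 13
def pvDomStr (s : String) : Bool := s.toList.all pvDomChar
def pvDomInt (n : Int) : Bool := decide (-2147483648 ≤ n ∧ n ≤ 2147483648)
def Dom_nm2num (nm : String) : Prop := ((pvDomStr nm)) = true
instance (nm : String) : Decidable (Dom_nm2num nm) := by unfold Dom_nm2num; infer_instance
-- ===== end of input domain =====

-- B accumulates the fields LSB-first and counts the mask's leading 1-bits top-down with an
-- early exit, instead of A's Horner loop plus complement-and-shift width measurement.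

-- ===== PORT A =====
-- 'while mask != 0: count += 1; mask = mask >> 1'. For mask < 0 Python loops forever;
-- the 0 < mask guard only makes the same computation total (Pre_ keeps mask ≥ 0).
def pvWcLoop (mask count : Int) : Int :=
  if h : 0 < mask then pvWcLoop (mask >>> (1:Nat)) (count + 1) else count
termination_by mask.toNat
decreasing_by
  simp only [Int.shiftRight_eq_div_pow]
  omega

def nm2num (nm : String) : Int :=
  let tmp := (PySem.Str.split? nm ".").getD []   -- sep "." is nonempty: split? is always some
  match tmp.foldl
      (fun acc m => acc.bind fun mask => (PySem.Int.ofStr? m).map fun v => (mask <<< (8:Nat)) + v)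
      (some (0 : Int)) with
  | none => 0                                    -- int(m) raised ValueError; excluded by Pre_
  | some mask => 32 - pvWcLoop (0xffffffff - mask) 0

-- ===== PORT B =====
-- 'for f in reversed(fields): mask += int(f) << shift; shift += 8' — recursion over the
-- reversed field list carrying (mask, shift); none = a ValueError from int(f)
def pvSumGo : List String → Int → Nat → Option Int
  | [], mask, _ => some mask
  | f :: rest, mask, shift =>
    (PySem.Int.ofStr? f).bind fun v => pvSumGo rest (mask + (v <<< shift)) (shift + 8)

-- 'for bit in range(31, -1, -1): if (mask >> bit) & 1 == 0: break; count += 1' — the loop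
-- variable bit runs 31,30,…,0; it is carried as the Nat n = bit + 1 (n = 32 initially),
-- the exhausted range being the n = 0 case
def pvScan (mask : Int) : Nat → Int → Int
  | 0, count => count
  | n + 1, count =>
    if PySem.Int.band (mask >>> n) 1 = 0 then count else pvScan mask n (count + 1)

def nm2num_alt (nm : String) : Int :=
  match pvSumGo ((PySem.Str.split? nm ".").getD []).reverse 0 0 with
  | none => 0
  | some mask => pvScan mask 32 0

-- ===== PRECONDITION & SPEC =====
-- the netmask's base-256 numeric value (used by Pre_ to bound the input)
def pvMaskVal (parts : List String) : Int :=
  parts.foldl (fun a m => a * 256 + (PySem.Int.ofStr? m).getD 0) 0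

-- Pre_ excludes the inputs on which A does not return — a field int() cannot parse
-- (ValueError), and masks above 0xffffffff, whose negative wildcard makes A's loop run
-- forever — and also strings whose fields make the mask value negative: a negative mask is
-- not a netmask, and A's negative result there (e.g. -1 for "-1") specifies nothing.
def Pre_nm2num (nm : String) : Prop :=
  let parts := (PySem.Str.split? nm ".").getD []
  (∀ m ∈ parts, ((PySem.Int.ofStr? m).isSome : Bool) = true) ∧
  0 ≤ pvMaskVal parts ∧ pvMaskVal parts ≤ 0xffffffff
instance (nm : String) : Decidable (Pre_nm2num nm) := by unfold Pre_nm2num; infer_instance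

def pvWitness_nm2num : String := "255.255.255.0"

def Spec_nm2num (nm : String) (out : Int) : Prop := out = nm2num_alt nm
instance (nm : String) (out : Int) : Decidable (Spec_nm2num nm out) := by unfold Spec_nm2num; infer_instance

-- ===== CLAIM (what is proved, stated in full; the proofs are below) =====
def Claim_equal_nm2num : Prop := ∀ (nm : String), Dom_nm2num nm → Pre_nm2num nm → Spec_nm2num nm (nm2num nm)

-- ===== LEMMAS AND PROOFS =====

-- A's shift-and-count loop computes count + bit_length(mask) for mask ≥ 0
theorem pvWcLoop_eq (mask count : Int) (h : 0 ≤ mask) :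
    pvWcLoop mask count = count + (PySem.Int.bitLength mask : Int) := by
  by_cases h0 : 0 < mask
  · rw [pvWcLoop]
    simp only [h0, dif_pos]
    have hsh : mask >>> (1:Nat) = PySem.Int.floordiv mask 2 := by
      rw [PySem.Int.floordiv_eq_ediv_of_pos (by norm_num), Int.shiftRight_eq_div_pow]
      norm_num
    rw [hsh, pvWcLoop_eq _ _ (by
        have := PySem.Int.floordiv_eq_ediv_of_pos (a := mask) (b := 2) (by norm_num)
        omega)]
    rw [PySem.Int.bitLength_of_pos h0]
    push_cast; ring
  · have : mask = 0 := by omega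
    subst this
    rw [pvWcLoop]
    simp
termination_by mask.toNat
decreasing_by
  simp only [Int.shiftRight_eq_div_pow] at *
  have := PySem.Int.floordiv_eq_ediv_of_pos (a := mask) (b := 2) (by norm_num)
  omega

-- bit_length is determined by its bracket 2^(L-1) ≤ n < 2^L
theorem pvBl_unique (n : Int) (L : Nat) (h1 : (2:Int) ^ (L - 1) ≤ n) (h2 : n < 2 ^ L) :
    PySem.Int.bitLength n = L := by
  have hn : 0 < n := lt_of_lt_of_le (by positivity) h1
  have hnz : n ≠ 0 := ne_of_gt hn
  have hub := PySem.Int.lt_two_pow_bitLength n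
  have hlb := PySem.Int.two_pow_bitLength_le n hnz
  have hcast : (n.natAbs : Int) = n := Int.natAbs_of_nonneg hn.le
  have h1' : 2 ^ (L - 1) ≤ n.natAbs := by rw [← hcast] at h1; exact_mod_cast h1
  have h2' : n.natAbs < 2 ^ L := by rw [← hcast] at h2; exact_mod_cast h2
  have hBL : PySem.Int.bitLength n ≤ L := by
    by_contra hc
    push Not at hc
    have : 2 ^ L ≤ 2 ^ (PySem.Int.bitLength n - 1) := Nat.pow_le_pow_right (by norm_num) (by omega)
    omega
  have hLB : L ≤ PySem.Int.bitLength n := by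
    by_contra hc
    push Not at hc
    have : 2 ^ PySem.Int.bitLength n ≤ 2 ^ (L - 1) := Nat.pow_le_pow_right (by norm_num) (by omega)
    omega
  omega

-- splitting one binary digit off an emod by a power of two
theorem pvEmod_pow_succ (mask : Int) (n : Nat) :
    mask % 2 ^ (n + 1) = mask / 2 ^ n % 2 * 2 ^ n + mask % 2 ^ n := by
  have e1 : mask % 2 ^ (n + 1) = mask - 2 ^ (n + 1) * (mask / 2 ^ (n + 1)) := Int.emod_def _ _
  have e2 : mask / 2 ^ (n + 1) = mask / 2 ^ n / 2 := by
    rw [pow_succ]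
    exact (Int.ediv_ediv_of_nonneg (by positivity)).symm
  have e3 : mask / 2 ^ n % 2 = mask / 2 ^ n - 2 * (mask / 2 ^ n / 2) := Int.emod_def _ _
  have e4 : mask % 2 ^ n = mask - 2 ^ n * (mask / 2 ^ n) := Int.emod_def _ _
  rw [e1, e2, e3, e4, pow_succ]
  ring

-- B's top-down scan counts, below bit n, the leading ones of mask: n minus the width of
-- the complement of its low n bits
theorem pvScan_eq (n : Nat) (mask count : Int) :
    pvScan mask n count
      = count + (n : Int) - (PySem.Int.bitLength (2 ^ n - 1 - mask % 2 ^ n) : Int) := by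
  induction n generalizing count with
  | zero => simp [pvScan, PySem.Int.bitLength_zero]
  | succ n ih =>
    have hpow : (0:Int) < 2 ^ n := by positivity
    have hsh : mask >>> n = mask / 2 ^ n := Int.shiftRight_eq_div_pow mask n
    have hband : PySem.Int.band (mask / 2 ^ n) 1 = mask / 2 ^ n % 2 := by
      rw [PySem.Int.band_one, PySem.Int.mod_eq_emod_of_pos (by norm_num)]
    have hbit : mask / 2 ^ n % 2 = 0 ∨ mask / 2 ^ n % 2 = 1 := Int.emod_two_eq_zero_or_one _
    have hlo0 : 0 ≤ mask % 2 ^ n := Int.emod_nonneg mask (by positivity)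
    have hlo1 : mask % 2 ^ n < 2 ^ n := Int.emod_lt_of_pos mask hpow
    have hsplit := pvEmod_pow_succ mask n
    rw [pvScan, hsh, hband]
    rcases hbit with hb | hb
    · rw [hb, if_pos rfl]
      have hw : PySem.Int.bitLength (2 ^ (n + 1) - 1 - mask % 2 ^ (n + 1)) = n + 1 := by
        apply pvBl_unique
        · have : (2:Int) ^ (n + 1 - 1) = 2 ^ n := by norm_num
          rw [this, hsplit, hb, pow_succ]
          nlinarith
        · rw [hsplit, hb, pow_succ]
          nlinarith
      rw [hw]
      push_cast; ring
    · rw [hb, if_neg (by norm_num), ih]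
      have hw : (2:Int) ^ (n + 1) - 1 - mask % 2 ^ (n + 1) = 2 ^ n - 1 - mask % 2 ^ n := by
        rw [hsplit, hb, pow_succ]; ring
      rw [hw]
      push_cast; ring

-- the value of B's accumulation, all fields assumed to parse (getD 0 never read under Pre_)
def pvSumVal : List String → Nat → Int
  | [], _ => 0
  | f :: rest, shift => (PySem.Int.ofStr? f).getD 0 * 2 ^ shift + pvSumVal rest (shift + 8)

theorem pvSumGo_eq (parts : List String) (mask : Int) (shift : Nat)
    (h : ∀ m ∈ parts, ((PySem.Int.ofStr? m).isSome : Bool) = true) :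
    pvSumGo parts mask shift = some (mask + pvSumVal parts shift) := by
  induction parts generalizing mask shift with
  | nil => simp [pvSumGo, pvSumVal]
  | cons f rest ih =>
    obtain ⟨v, hv⟩ := Option.isSome_iff_exists.mp (h f (by simp))
    rw [pvSumGo, hv, Option.bind_some, ih _ _ (fun x hx => h x (by simp [hx])), pvSumVal, hv]
    simp only [Option.getD_some, Option.some.injEq, Int.shiftLeft_eq]
    ring

theorem pvAFold_eq (parts : List String) (a0 : Int)
    (h : ∀ m ∈ parts, ((PySem.Int.ofStr? m).isSome : Bool) = true) :
    parts.foldl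
      (fun acc m => acc.bind fun mask => (PySem.Int.ofStr? m).map fun v => (mask <<< (8:Nat)) + v)
      (some a0)
    = some (parts.foldl (fun a m => a * 256 + (PySem.Int.ofStr? m).getD 0) a0) := by
  induction parts generalizing a0 with
  | nil => rfl
  | cons m rest ih =>
    obtain ⟨v, hv⟩ := Option.isSome_iff_exists.mp (h m (by simp))
    simp only [List.foldl_cons, hv, Option.bind_some, Option.map_some]
    have hstep : a0 <<< (8:Nat) + v = a0 * 256 + (PySem.Int.ofStr? m).getD 0 := by
      rw [Int.shiftLeft_eq, hv]; norm_num
    rw [hstep, ih _ (fun x hx => h x (by simp [hx])), hv]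

theorem pvSumVal_append (l1 l2 : List String) (shift : Nat) :
    pvSumVal (l1 ++ l2) shift = pvSumVal l1 shift + pvSumVal l2 (shift + 8 * l1.length) := by
  induction l1 generalizing shift with
  | nil => simp [pvSumVal]
  | cons m rest ih =>
    simp only [List.cons_append, pvSumVal, ih (shift + 8), List.length_cons]
    ring_nf

theorem pvHorner_eq_sum (parts : List String) (a : Int) :
    parts.foldl (fun a m => a * 256 + (PySem.Int.ofStr? m).getD 0) a
      = a * 256 ^ parts.length + pvSumVal parts.reverse 0 := by
  induction parts generalizing a with
  | nil => simp [pvSumVal]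
  | cons m rest ih =>
    simp only [List.foldl_cons, List.reverse_cons, List.length_cons, pvSumVal_append, ih]
    simp only [pvSumVal, List.length_reverse]
    have h28 : ∀ n : Nat, (2:Int) ^ (8 * n) = 256 ^ n := by
      intro n; rw [pow_mul]; norm_num
    simp only [Nat.zero_add, h28]
    ring

theorem nm2num_spec_aux (nm : String) (hpre : Pre_nm2num nm) : nm2num nm = nm2num_alt nm := by
  unfold Pre_nm2num at hpre
  simp only [nm2num, nm2num_alt]
  generalize (PySem.Str.split? nm ".").getD [] = parts at hpre ⊢
  obtain ⟨hsome, hlo, hhi⟩ := hpre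
  rw [pvAFold_eq parts 0 hsome,
      pvSumGo_eq parts.reverse 0 0 (fun m hm => hsome m (List.mem_reverse.mp hm))]
  have hval : parts.foldl (fun a m => a * 256 + (PySem.Int.ofStr? m).getD 0) 0
      = pvSumVal parts.reverse 0 := by
    rw [pvHorner_eq_sum]; ring
  unfold pvMaskVal at hlo hhi
  rw [hval] at hlo hhi ⊢
  dsimp only
  rw [pvWcLoop_eq _ _ (by omega), pvScan_eq]
  have hmod : (0 + pvSumVal parts.reverse 0) % 2 ^ (32:Nat) = pvSumVal parts.reverse 0 := by
    rw [zero_add]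
    exact Int.emod_eq_of_lt hlo (by norm_num at hhi ⊢; omega)
  rw [hmod]
  norm_num

-- ===== VERDICT (by name: the statement is the Claim_ definition above) =====
theorem nm2num_spec : Claim_equal_nm2num := by
  intro nm _ hpre
  exact nm2num_spec_aux nm hpre
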